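-- pv_equiv track=rewrite | github.com/pypi-data/pypi-mirror-371 | packages/data-exploratory-project/data_exploratory_project-1.0.0.tar.gz/data_exploratory_project-1.0.0/setup/pre_commit_hook.py | is_component_file
-- ===== SOURCE A (Python) =====
-- def is_component_file(file_path: str) -> bool:
--     """Check if a file is a component file that should trigger auto-discovery."""
--     component_patterns = [
--         # Data model files
--         'models/data_models/',
--         '*_model.py',
--
--         # Estimator files
--         'analysis/',
--         '*_estimator.py',
--
--         # Neural component files
--         'models/data_models/neural_fsde/',
--         'models/neural/',
--
--         # High-performance files
--         'analysis/high_performance/',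
--
--         # Test files
--         'tests/',
--         'test_*.py'
--     ]
--
--     file_path_lower = file_path.lower()
--
--     for pattern in component_patterns:
--         if pattern.endswith('/'):
--             if pattern in file_path_lower:
--                 return True
--         elif pattern.startswith('*'):
--             if file_path_lower.endswith(pattern[1:]):
--                 return True
--         else:
--             if pattern in file_path_lower:
--                 return True
--
--     return False
-- ===== SOURCE B (Python) =====
-- import re
--
-- _COMPONENT_PATTERNS = [
--     'models/data_models/',
--     '*_model.py',
--     'analysis/',
--     '*_estimator.py',
--     'models/data_models/neural_fsde/',
--     'models/neural/',
--     'analysis/high_performance/',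
--     'tests/',
--     'test_*.py',
-- ]
--
-- # One compiled regex: '*'-patterns become end-anchored literals, the rest plain
-- # substring literals; a single engine scan replaces per-pattern checks.
-- _PATTERN_RE = re.compile('|'.join(
--     re.escape(p[1:]) + r'\Z' if p.startswith('*') else re.escape(p)
--     for p in _COMPONENT_PATTERNS))
--
--
-- def is_component_file(file_path: str) -> bool:
--     """Check if a file is a component file that should trigger auto-discovery."""
--     return _PATTERN_RE.search(file_path.lower()) is not None
-- ===== Notes on version B (the rewrite author's own statement) =====
-- stated objective: idiomatic
-- what changed: Replaces A's per-pattern branching loop (classify each pattern, then 'in'/'endswith' test) by one regex compiled once from the pattern list (escaped literals, '*'-patterns end-anchored with \Z) and a single engine search over the lowercased path.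
import Mathlib
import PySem

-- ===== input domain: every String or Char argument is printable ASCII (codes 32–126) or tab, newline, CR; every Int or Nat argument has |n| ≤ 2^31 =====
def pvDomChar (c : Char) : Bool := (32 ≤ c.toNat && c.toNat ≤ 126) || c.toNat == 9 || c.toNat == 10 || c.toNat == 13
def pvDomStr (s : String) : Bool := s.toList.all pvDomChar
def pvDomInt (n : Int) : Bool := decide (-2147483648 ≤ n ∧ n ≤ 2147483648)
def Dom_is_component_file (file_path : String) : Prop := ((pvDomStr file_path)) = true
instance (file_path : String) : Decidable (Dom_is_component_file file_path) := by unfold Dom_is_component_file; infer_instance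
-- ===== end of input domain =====

-- B replaces A's per-pattern branching loop by one regex compiled from the
-- pattern list ('*'-patterns end-anchored); its port is the engine's scan:
-- at each start position try each alternative (idiomatic rewrite, same cost).


-- ===== PORT A =====
def componentPatterns : List String :=
  ["models/data_models/", "*_model.py", "analysis/", "*_estimator.py",
   "models/data_models/neural_fsde/", "models/neural/",
   "analysis/high_performance/", "tests/", "test_*.py"]

def aLoop (lp : String) : List String → Bool
  | [] => false
  | p :: rest =>
    if PySem.Str.endswith p "/" then
      if PySem.Str.isIn p lp then true else aLoop lp rest
    else if PySem.Str.startswith p "*" then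
      if PySem.Str.endswith lp (PySem.Str.slice p (some 1) none) then true else aLoop lp rest
    else
      if PySem.Str.isIn p lp then true else aLoop lp rest

def is_component_file (file_path : String) : Bool :=
  aLoop (PySem.Str.lower file_path) componentPatterns

-- ===== PORT B =====
-- the compiled regex: each alternative is a literal with an end-anchor flag
-- (true = the pattern came from a '*'-pattern, so it carries '\Z')
def reAlternatives : List (List Char × Bool) :=
  [("models/data_models/".toList, false),
   ("_model.py".toList, true),
   ("analysis/".toList, false),
   ("_estimator.py".toList, true),
   ("models/data_models/neural_fsde/".toList, false),
   ("models/neural/".toList, false),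
   ("analysis/high_performance/".toList, false),
   ("tests/".toList, false),
   ("test_*.py".toList, false)]

-- hand port of re.search's semantics for this regex: an alternative matches at
-- position i iff its literal is there (and, if anchored, reaches end of string)
def reMatchAt (lp : List Char) (i : Nat) (alt : List Char × Bool) : Bool :=
  if alt.2 then alt.1.isPrefixOf (lp.drop i) && decide (i + alt.1.length = lp.length)
  else alt.1.isPrefixOf (lp.drop i)

def is_component_file_alt (file_path : String) : Bool :=
  let lp := (PySem.Str.lower file_path).toList
  (List.range (lp.length + 1)).any (fun i => reAlternatives.any (reMatchAt lp i))

-- ===== PRECONDITION & SPEC =====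
def Spec_is_component_file (file_path : String) (out : Bool) : Prop := out = is_component_file_alt file_path
instance (file_path : String) (out : Bool) : Decidable (Spec_is_component_file file_path out) := by unfold Spec_is_component_file; infer_instance

-- ===== CLAIM (what is proved, stated in full; the proofs are below) =====
def Claim_equal_is_component_file : Prop := ∀ (file_path : String), Dom_is_component_file file_path → Spec_is_component_file file_path (is_component_file file_path)

-- ===== LEMMAS AND PROOFS =====

-- an unanchored alternative matches at some position iff it is a substring
theorem scan_unanchored (lp p : List Char) :
    (∃ i, i ≤ lp.length ∧ p <+: lp.drop i) ↔ p <:+: lp := by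
  rw [← PySem.Chars.isIn_iff_infix, ← PySem.Chars.exists_prefix_drop_iff_isIn]
  constructor
  · rintro ⟨i, -, h⟩; exact ⟨i, h⟩
  · rintro ⟨j, h⟩
    by_cases hj : j ≤ lp.length
    · exact ⟨j, hj, h⟩
    · refine ⟨lp.length, le_rfl, ?_⟩
      rw [List.drop_of_length_le (by omega)] at h
      simpa [List.drop_length] using h

-- an anchored alternative matches at some position iff it is a suffix
theorem scan_anchored (lp p : List Char) :
    (∃ i, i ≤ lp.length ∧ (p <+: lp.drop i ∧ i + p.length = lp.length)) ↔
      PySem.Chars.endswith lp p = true := by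
  rw [PySem.Chars.endswith_iff]
  constructor
  · rintro ⟨i, -, hpre, hlen⟩
    have heq := List.IsPrefix.eq_of_length_le hpre (by simp [List.length_drop]; omega)
    rw [heq]; exact List.drop_suffix _ _
  · intro hsuf
    refine ⟨lp.length - p.length, by omega, ?_, by have := hsuf.length_le; omega⟩
    obtain ⟨t, ht⟩ := hsuf
    have hdrop : lp.drop (lp.length - p.length) = p := by
      rw [← ht]
      have hlen : (t ++ p).length - p.length = t.length := by simp
      rw [hlen, List.drop_left]
    rw [hdrop]

-- the two anchored alternatives, with their lengths evaluated
theorem scan_anchored_model (lp : List Char) :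
    (∃ i, i ≤ lp.length ∧ (['_', 'm', 'o', 'd', 'e', 'l', '.', 'p', 'y'] <+: lp.drop i ∧ i + 9 = lp.length)) ↔
      PySem.Chars.endswith lp ['_', 'm', 'o', 'd', 'e', 'l', '.', 'p', 'y'] = true := by
  simpa using scan_anchored lp ['_', 'm', 'o', 'd', 'e', 'l', '.', 'p', 'y']

theorem scan_anchored_estimator (lp : List Char) :
    (∃ i, i ≤ lp.length ∧ (['_', 'e', 's', 't', 'i', 'm', 'a', 't', 'o', 'r', '.', 'p', 'y'] <+: lp.drop i ∧ i + 13 = lp.length)) ↔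
      PySem.Chars.endswith lp ['_', 'e', 's', 't', 'i', 'm', 'a', 't', 'o', 'r', '.', 'p', 'y'] = true := by
  simpa using scan_anchored lp ['_', 'e', 's', 't', 'i', 'm', 'a', 't', 'o', 'r', '.', 'p', 'y']

-- ===== VERDICT (by name: the statement is the Claim_ definition above) =====
set_option maxHeartbeats 1000000 in
theorem is_component_file_spec : Claim_equal_is_component_file := by
  intro fp _
  unfold Spec_is_component_file is_component_file is_component_file_alt
  rw [Bool.eq_iff_iff]
  simp [aLoop, componentPatterns, reAlternatives, reMatchAt,
    PySem.Str.isIn, PySem.Str.endswith, PySem.Str.startswith, PySem.Str.slice,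
    show PySem.Chars.endswith ['m', 'o', 'd', 'e', 'l', 's', '/', 'd', 'a', 't', 'a', '_', 'm', 'o', 'd', 'e', 'l', 's', '/'] ['/'] = true from by decide,
    show PySem.Chars.endswith ['*', '_', 'm', 'o', 'd', 'e', 'l', '.', 'p', 'y'] ['/'] = false from by decide,
    show PySem.Chars.endswith ['a', 'n', 'a', 'l', 'y', 's', 'i', 's', '/'] ['/'] = true from by decide,
    show PySem.Chars.endswith ['*', '_', 'e', 's', 't', 'i', 'm', 'a', 't', 'o', 'r', '.', 'p', 'y'] ['/'] = false from by decide,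
    show PySem.Chars.endswith ['m', 'o', 'd', 'e', 'l', 's', '/', 'd', 'a', 't', 'a', '_', 'm', 'o', 'd', 'e', 'l', 's', '/', 'n', 'e', 'u', 'r', 'a', 'l', '_', 'f', 's', 'd', 'e', '/'] ['/'] = true from by decide,
    show PySem.Chars.endswith ['m', 'o', 'd', 'e', 'l', 's', '/', 'n', 'e', 'u', 'r', 'a', 'l', '/'] ['/'] = true from by decide,
    show PySem.Chars.endswith ['a', 'n', 'a', 'l', 'y', 's', 'i', 's', '/', 'h', 'i', 'g', 'h', '_', 'p', 'e', 'r', 'f', 'o', 'r', 'm', 'a', 'n', 'c', 'e', '/'] ['/'] = true from by decide,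
    show PySem.Chars.endswith ['t', 'e', 's', 't', 's', '/'] ['/'] = true from by decide,
    show PySem.Chars.endswith ['t', 'e', 's', 't', '_', '*', '.', 'p', 'y'] ['/'] = false from by decide,
    show PySem.Chars.startswith ['*', '_', 'm', 'o', 'd', 'e', 'l', '.', 'p', 'y'] ['*'] = true from by decide,
    show PySem.Chars.startswith ['*', '_', 'e', 's', 't', 'i', 'm', 'a', 't', 'o', 'r', '.', 'p', 'y'] ['*'] = true from by decide,
    show PySem.Chars.startswith ['t', 'e', 's', 't', '_', '*', '.', 'p', 'y'] ['*'] = false from by decide,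
    show PySem.List.slice ['*', '_', 'm', 'o', 'd', 'e', 'l', '.', 'p', 'y'] (some 1) none = ['_', 'm', 'o', 'd', 'e', 'l', '.', 'p', 'y'] from by decide,
    show PySem.List.slice ['*', '_', 'e', 's', 't', 'i', 'm', 'a', 't', 'o', 'r', '.', 'p', 'y'] (some 1) none = ['_', 'e', 's', 't', 'i', 'm', 'a', 't', 'o', 'r', '.', 'p', 'y'] from by decide,
    PySem.Chars.isIn_iff_infix, and_or_left, exists_or,
    scan_unanchored, scan_anchored_model, scan_anchored_estimator]
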